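-- pv_equiv track=rewrite | github.com/Aloys233/astrbot_plugin_service_watcher | lib/adapters.py | _infer_indicator
-- ===== SOURCE A (Python) =====
-- from typing import Dict, Optional, Any, List
--
-- def _infer_indicator(events: List[Dict[str, str]]) -> str:
--     text = " ".join(
--         f"{event.get('severity', '')} {event.get('status', '')} {event.get('title', '')}"
--         for event in events
--     ).lower()
--
--     if any(keyword in text for keyword in ['critical', 'severe', 'high', 'major', '严重', '紧急']):
--         return 'major'
--     return 'minor'
-- ===== SOURCE B (Python) =====
-- def _infer_indicator(events):
--     keywords = ['critical', 'severe', 'high', 'major', '严重', '紧急']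
--     for event in events:
--         for key in ('severity', 'status', 'title'):
--             field = str(event.get(key, '')).lower()
--             if any(keyword in field for keyword in keywords):
--                 return 'major'
--     return 'minor'
-- ===== Notes on version B (the rewrite author's own statement) =====
-- stated objective: alternative
-- what changed: B never builds the joined text: it scans event by event and field by field, checking keywords against each lowercased field and returning 'major' on the first hit (early exit), instead of concatenating all fields into one string, lowercasing it and scanning it once.
import Mathlib
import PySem

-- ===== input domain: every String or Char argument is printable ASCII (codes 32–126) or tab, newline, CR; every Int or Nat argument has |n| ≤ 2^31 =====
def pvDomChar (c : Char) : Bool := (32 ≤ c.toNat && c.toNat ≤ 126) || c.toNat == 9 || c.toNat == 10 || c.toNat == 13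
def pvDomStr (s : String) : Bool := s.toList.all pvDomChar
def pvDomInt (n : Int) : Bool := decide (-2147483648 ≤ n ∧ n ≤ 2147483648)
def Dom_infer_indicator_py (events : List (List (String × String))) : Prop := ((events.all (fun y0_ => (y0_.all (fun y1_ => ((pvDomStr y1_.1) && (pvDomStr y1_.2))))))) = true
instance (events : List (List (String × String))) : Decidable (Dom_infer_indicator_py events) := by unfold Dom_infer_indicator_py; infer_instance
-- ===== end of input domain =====

-- B checks the keywords against each lowercased field directly (per event, per field, early exit)
-- instead of A's building one joined lowercased text and scanning it; alternative decomposition, same cost.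

-- ===== PORT A =====
def infer_indicator_py (events : List (List (String × String))) : String :=
  let text := PySem.Str.lower (PySem.Str.join " " (events.map (fun event =>
    PySem.Dict.getD (PySem.Dict.mk event) "severity" "" ++ " " ++
      PySem.Dict.getD (PySem.Dict.mk event) "status" "" ++ " " ++
      PySem.Dict.getD (PySem.Dict.mk event) "title" "")))
  if ["critical", "severe", "high", "major", "严重", "紧急"].any (fun keyword => PySem.Str.isIn keyword text)
  then "major" else "minor"

-- ===== PORT B =====
-- helper: does any keyword occur in any of the three lowercased fields of this event?
def pvFieldHit (event : List (String × String)) : Bool :=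
  ["severity", "status", "title"].any (fun key =>
    let field := PySem.Str.lower (PySem.Dict.getD (PySem.Dict.mk event) key "")
    ["critical", "severe", "high", "major", "严重", "紧急"].any (fun keyword => PySem.Str.isIn keyword field))

def infer_indicator_py_alt : List (List (String × String)) → String
  | [] => "minor"
  | event :: rest => if pvFieldHit event then "major" else infer_indicator_py_alt rest

-- ===== PRECONDITION & SPEC =====
def Spec_infer_indicator_py (events : List (List (String × String))) (out : String) : Prop := out = infer_indicator_py_alt events
instance (events : List (List (String × String))) (out : String) : Decidable (Spec_infer_indicator_py events out) := by unfold Spec_infer_indicator_py; infer_instance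

-- ===== CLAIM (what is proved, stated in full; the proofs are below) =====
def Claim_equal_infer_indicator_py : Prop := ∀ (events : List (List (String × String))), Dom_infer_indicator_py events → Spec_infer_indicator_py events (infer_indicator_py events)

-- ===== LEMMAS AND PROOFS =====

-- proof-side abbreviation: keyword kw occurs in one of the three lowercased fields of event e
def pvHit (kw : String) (e : List (String × String)) : Prop :=
  kw.toList <:+: PySem.Chars.lower (PySem.Dict.getD (PySem.Dict.mk e) "severity" "").toList ∨
  kw.toList <:+: PySem.Chars.lower (PySem.Dict.getD (PySem.Dict.mk e) "status" "").toList ∨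
  kw.toList <:+: PySem.Chars.lower (PySem.Dict.getD (PySem.Dict.mk e) "title" "").toList

theorem pv_lowerChar_space : PySem.Chars.lowerChar ' ' = ' ' := rfl

-- a space-free pattern is a prefix of `a ++ ' ' :: b` iff it is a prefix of `a`
theorem pv_prefix_space (kw a b : List Char) (hsp : ' ' ∉ kw) :
    kw <+: a ++ ' ' :: b ↔ kw <+: a := by
  induction kw generalizing a with
  | nil => simp
  | cons k ks ih =>
    cases a with
    | nil =>
      simp only [List.nil_append, List.cons_prefix_cons]
      constructor
      · rintro ⟨rfl, -⟩; exact absurd List.mem_cons_self hsp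
      · intro h; exact absurd h (by simp)
    | cons x a' =>
      simp only [List.cons_append, List.cons_prefix_cons]
      have := ih a' (fun h => hsp (List.mem_cons_of_mem _ h))
      tauto

-- a nonempty space-free pattern is an infix of `a ++ ' ' :: b` iff it is an infix of `a` or of `b`
theorem pv_infix_space (kw a b : List Char) (hne : kw ≠ []) (hsp : ' ' ∉ kw) :
    kw <:+: a ++ ' ' :: b ↔ kw <:+: a ∨ kw <:+: b := by
  induction a with
  | nil =>
    simp only [List.nil_append, List.infix_cons_iff]
    have h1 : ¬ kw <+: ' ' :: b := by
      cases kw with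
      | nil => exact absurd rfl hne
      | cons k ks =>
        simp only [List.cons_prefix_cons]
        rintro ⟨rfl, -⟩; exact hsp List.mem_cons_self
    have h2 : ¬ kw <:+: ([] : List Char) := by
      intro h; exact hne (List.eq_nil_of_infix_nil h)
    tauto
  | cons x a' ih =>
    simp only [List.cons_append, List.infix_cons_iff]
    have hx : kw <+: x :: (a' ++ ' ' :: b) ↔ kw <+: x :: a' := by
      cases kw with
      | nil => simp
      | cons k ks =>
        simp only [List.cons_prefix_cons]
        have := pv_prefix_space ks a' b (fun h => hsp (List.mem_cons_of_mem _ h))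
        tauto
    have hcons : kw <:+: x :: a' ↔ kw <+: x :: a' ∨ kw <:+: a' := List.infix_cons_iff
    tauto

-- a nonempty space-free pattern is an infix of the space-join iff it is an infix of some part
theorem pv_infix_intercalate (kw : List Char) (fs : List (List Char)) (hne : kw ≠ [])
    (hsp : ' ' ∉ kw) :
    kw <:+: List.intercalate [' '] fs ↔ ∃ f ∈ fs, kw <:+: f := by
  induction fs with
  | nil =>
    simp only [List.intercalate, List.intersperse, List.flatten_nil, List.not_mem_nil]
    constructor
    · intro h; exact absurd (List.eq_nil_of_infix_nil h) hne
    · rintro ⟨f, h, -⟩; exact absurd h (by simp)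
  | cons f rest ih =>
    cases rest with
    | nil => simp [List.intercalate]
    | cons g rest' =>
      have hstep : List.intercalate [' '] (f :: g :: rest') =
          f ++ ' ' :: List.intercalate [' '] (g :: rest') := by
        simp [List.intercalate]
      rw [hstep, pv_infix_space kw _ _ hne hsp, ih]
      simp

-- lowercasing commutes with the space-join
theorem pv_lower_intercalate (fs : List (List Char)) :
    PySem.Chars.lower (List.intercalate [' '] fs) =
      List.intercalate [' '] (fs.map PySem.Chars.lower) := by
  induction fs with
  | nil => simp [List.intercalate, PySem.Chars.lower]
  | cons f rest ih =>
    cases rest with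
    | nil => simp [List.intercalate]
    | cons g rest' =>
      have h1 : List.intercalate [' '] (f :: g :: rest') =
          f ++ ' ' :: List.intercalate [' '] (g :: rest') := by
        simp [List.intercalate]
      have h2 : List.intercalate [' '] ((f :: g :: rest').map PySem.Chars.lower) =
          PySem.Chars.lower f ++ ' ' :: List.intercalate [' '] ((g :: rest').map PySem.Chars.lower) := by
        simp [List.intercalate]
      rw [h1, h2, ← ih]
      simp [PySem.Chars.lower, pv_lowerChar_space]

-- per-keyword core: keyword in the lowered joined text ↔ keyword in some lowered field of some event
theorem pv_kw_text (kw : String) (hne : kw.toList ≠ []) (hsp : ' ' ∉ kw.toList)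
    (events : List (List (String × String))) :
    kw.toList <:+: PySem.Chars.lower (List.intercalate [' ']
        (events.map (fun e => (PySem.Dict.getD (PySem.Dict.mk e) "severity" "").toList ++ ' ' ::
          (PySem.Dict.getD (PySem.Dict.mk e) "status" "").toList ++ ' ' ::
          (PySem.Dict.getD (PySem.Dict.mk e) "title" "").toList)))
      ↔ ∃ e ∈ events, pvHit kw e := by
  rw [pv_lower_intercalate, pv_infix_intercalate kw.toList _ hne hsp]
  simp only [List.map_map, List.mem_map]
  constructor
  · rintro ⟨f, ⟨e, he, rfl⟩, hf⟩
    refine ⟨e, he, ?_⟩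
    simp only [Function.comp, PySem.Chars.lower, List.map_append, List.map_cons,
      pv_lowerChar_space] at hf
    rw [pv_infix_space _ _ _ hne hsp, pv_infix_space _ _ _ hne hsp] at hf
    simp only [pvHit, PySem.Chars.lower]
    tauto
  · rintro ⟨e, he, hf⟩
    exact ⟨_, ⟨e, he, rfl⟩, by
      simp only [Function.comp, PySem.Chars.lower, List.map_append, List.map_cons,
        pv_lowerChar_space]
      rw [pv_infix_space _ _ _ hne hsp, pv_infix_space _ _ _ hne hsp]
      simp only [pvHit, PySem.Chars.lower] at hf
      tauto⟩

-- the joined lowered text of port A, on the character-list side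
theorem pv_text_toList (events : List (List (String × String))) :
    (PySem.Str.lower (PySem.Str.join " " (events.map (fun event =>
      PySem.Dict.getD (PySem.Dict.mk event) "severity" "" ++ " " ++
        PySem.Dict.getD (PySem.Dict.mk event) "status" "" ++ " " ++
        PySem.Dict.getD (PySem.Dict.mk event) "title" "")))).toList =
    PySem.Chars.lower (List.intercalate [' ']
      (events.map (fun e => (PySem.Dict.getD (PySem.Dict.mk e) "severity" "").toList ++ ' ' ::
        (PySem.Dict.getD (PySem.Dict.mk e) "status" "").toList ++ ' ' ::
        (PySem.Dict.getD (PySem.Dict.mk e) "title" "").toList))) := by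
  simp only [pysem, String.toList_ofList, PySem.Str.join, PySem.Chars.join, List.map_map]
  have hsep : (" " : String).toList = [' '] := rfl
  rw [hsep]
  refine congrArg _ (congrArg _ (List.map_congr_left fun e _ => ?_))
  simp only [Function.comp_apply, String.toList_append, hsep]
  simp

-- B's per-event helper hits iff some keyword occurs in some lowered field
theorem pv_fieldHit_iff (e : List (String × String)) :
    pvFieldHit e = true ↔
      ∃ kw ∈ (["critical", "severe", "high", "major", "严重", "紧急"] : List String), pvHit kw e := by
  have hswap : ∀ {α β : Type} (K : List α) (L : List β) (P : α → β → Prop),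
      (∃ k ∈ K, ∃ l ∈ L, P k l) ↔ (∃ l ∈ L, ∃ k ∈ K, P k l) := by
    intro α β K L P
    constructor <;> rintro ⟨x, hx, y, hy, h⟩ <;> exact ⟨y, hy, x, hx, h⟩
  simp only [pvFieldHit, List.any_eq_true, PySem.Str.isIn_iff_infix, PySem.Str.toList_lower]
  rw [hswap]
  refine exists_congr fun kw => and_congr_right fun _ => ?_
  simp only [pvHit, List.mem_cons, List.not_mem_nil, or_false, exists_eq_or_imp, exists_eq_left]

-- B's loop is the 'any' over events
theorem pv_alt_eq (events : List (List (String × String))) :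
    infer_indicator_py_alt events = if events.any pvFieldHit then "major" else "minor" := by
  induction events with
  | nil => simp [infer_indicator_py_alt]
  | cons e rest ih =>
    by_cases h : pvFieldHit e <;> simp [infer_indicator_py_alt, h, ih]

-- ===== VERDICT (by name: the statement is the Claim_ definition above) =====
theorem infer_indicator_py_spec : Claim_equal_infer_indicator_py := by
  intro events _
  unfold Spec_infer_indicator_py
  rw [pv_alt_eq]
  simp only [infer_indicator_py]
  have hkwok : ∀ kw ∈ (["critical", "severe", "high", "major", "严重", "紧急"] : List String),
      kw.toList ≠ [] ∧ ' ' ∉ kw.toList := by decide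
  have hcond : (["critical", "severe", "high", "major", "严重", "紧急"] : List String).any
      (fun keyword => PySem.Str.isIn keyword (PySem.Str.lower (PySem.Str.join " " (events.map (fun event =>
        PySem.Dict.getD (PySem.Dict.mk event) "severity" "" ++ " " ++
          PySem.Dict.getD (PySem.Dict.mk event) "status" "" ++ " " ++
          PySem.Dict.getD (PySem.Dict.mk event) "title" ""))))) = events.any pvFieldHit := by
    rw [Bool.eq_iff_iff]
    simp only [List.any_eq_true]
    constructor
    · rintro ⟨kw, hk, hin⟩
      rw [PySem.Str.isIn_iff_infix, pv_text_toList,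
        pv_kw_text kw (hkwok kw hk).1 (hkwok kw hk).2 events] at hin
      obtain ⟨e, he, hf⟩ := hin
      exact ⟨e, he, (pv_fieldHit_iff e).2 ⟨kw, hk, hf⟩⟩
    · rintro ⟨e, he, hf⟩
      obtain ⟨kw, hk, hkw⟩ := (pv_fieldHit_iff e).1 hf
      refine ⟨kw, hk, ?_⟩
      rw [PySem.Str.isIn_iff_infix, pv_text_toList,
        pv_kw_text kw (hkwok kw hk).1 (hkwok kw hk).2 events]
      exact ⟨e, he, hkw⟩
  rw [hcond]
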